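-- pv_equiv track=rewrite | github.com/wilsoncastello/problemasProgramacao | ruan2/Problema0442/Problema0442.py | calculo
-- ===== SOURCE A (Python) =====
-- def calculo(n1, n2):
--     if(n1 % n2 == 0):
--         s = 0
--
--     else:
--         if(n1 > n2):
--             while(n1 % n2 != 0):
--                 n2 = n2 + 1
--                 s = n2
--
--         else:
--             while(n1 % n2 != 0):
--                 n2 = n2 - 1
--                 s = n2
--
--     return s
-- ===== SOURCE B (Python) =====
-- def calculo(n1, n2):
--     if n1 % n2 == 0:
--         return 0
--     a = abs(n1)
--     cands = []
--     d = 1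
--     while d * d <= a:
--         if a % d == 0:
--             q = a // d
--             cands += [d, -d, q, -q]
--         d += 1
--     if n1 > n2:
--         return min(x for x in cands if x > n2)
--     return max(x for x in cands if x < n2)
-- ===== Notes on version B (the rewrite author's own statement) =====
-- stated objective: faster
-- what changed: A walks n2 one step at a time until it divides n1; B enumerates all divisors of |n1| by trial division up to sqrt(|n1|) and picks the nearest one on the correct side with min/max.
import Mathlib
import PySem

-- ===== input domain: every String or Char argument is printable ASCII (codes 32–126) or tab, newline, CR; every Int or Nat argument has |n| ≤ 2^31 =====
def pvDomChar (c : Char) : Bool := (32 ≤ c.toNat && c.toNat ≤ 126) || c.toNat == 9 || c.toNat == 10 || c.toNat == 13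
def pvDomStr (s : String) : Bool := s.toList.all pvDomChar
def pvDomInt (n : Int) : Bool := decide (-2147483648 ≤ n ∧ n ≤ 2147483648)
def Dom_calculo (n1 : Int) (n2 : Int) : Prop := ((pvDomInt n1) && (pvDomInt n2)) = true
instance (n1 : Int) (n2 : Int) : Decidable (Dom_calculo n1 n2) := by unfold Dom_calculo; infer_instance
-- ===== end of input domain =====

-- B replaces A's unit-step linear walk by trial-division divisor enumeration up to sqrt(|n1|) (faster, asymptotic).


-- ===== PORT A =====
-- A's `while n1 % n2 != 0: n2 += 1; s = n2` — structural recursion on a fuel argument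
-- that is proved sufficient on Pre_ in the proofs below; the loop state is exactly n2,
-- and the returned value is the final n2 (= s, since the loop runs at least once here).
def pvLoopUp (n1 : Int) : Nat → Int → Int
  | 0, n2 => n2
  | f+1, n2 => if PySem.Int.mod n1 n2 ≠ 0 then pvLoopUp n1 f (n2 + 1) else n2

-- A's `while n1 % n2 != 0: n2 -= 1; s = n2`
def pvLoopDown (n1 : Int) : Nat → Int → Int
  | 0, n2 => n2
  | f+1, n2 => if PySem.Int.mod n1 n2 ≠ 0 then pvLoopDown n1 f (n2 - 1) else n2

def calculo (n1 : Int) (n2 : Int) : Int :=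
  if PySem.Int.mod n1 n2 = 0 then 0
  else if n1 > n2 then pvLoopUp n1 ((max n1 (-1) - n2).toNat + 1) n2
  else pvLoopDown n1 ((n2 - min n1 1).toNat + 1) n2

-- ===== PORT B =====
-- Source B's `while d*d <= a: if a % d == 0: cands += [d, -d, a//d, -(a//d)]; d += 1`,
-- fuel recursion on the same state (d, cands); fuel a.toNat+1 is proved sufficient below.
def pvCollect (a : Int) : Nat → Int → List Int → List Int
  | 0, _, acc => acc
  | f+1, d, acc =>
    if d * d ≤ a then
      pvCollect a f (d + 1)
        (if PySem.Int.mod a d = 0 then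
           acc ++ [d, -d, PySem.Int.floordiv a d, -(PySem.Int.floordiv a d)]
         else acc)
    else acc

-- Python's min/max over the filtered candidates; on Pre_ the filtered list is provably
-- nonempty, so the `.getD 0` default is unreachable (Python's min/max raise only on empty).
def calculo_alt (n1 : Int) (n2 : Int) : Int :=
  if PySem.Int.mod n1 n2 = 0 then 0
  else
    let a := |n1|
    let cands := pvCollect a (a.toNat + 1) 1 []
    if n1 > n2 then (PySem.List.min? (cands.filter (fun x => n2 < x)) (fun x => x)).getD 0
    else (PySem.List.max? (cands.filter (fun x => x < n2)) (fun x => x)).getD 0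

-- ===== PRECONDITION & SPEC =====
-- Pre_ excludes exactly n2 = 0, on which Python A raises ZeroDivisionError (so does B).
def Pre_calculo (n1 : Int) (n2 : Int) : Prop := n2 ≠ 0
instance (n1 : Int) (n2 : Int) : Decidable (Pre_calculo n1 n2) := by unfold Pre_calculo; infer_instance
def pvWitness_calculo : Int × Int := (10, 3)

def Spec_calculo (n1 : Int) (n2 : Int) (out : Int) : Prop := out = calculo_alt n1 n2
instance (n1 : Int) (n2 : Int) (out : Int) : Decidable (Spec_calculo n1 n2 out) := by unfold Spec_calculo; infer_instance

-- ===== CLAIM (what is proved, stated in full; the proofs are below) =====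
def Claim_equal_calculo : Prop := ∀ (n1 : Int) (n2 : Int), Dom_calculo n1 n2 → Pre_calculo n1 n2 → Spec_calculo n1 n2 (calculo n1 n2)

-- ===== LEMMAS AND PROOFS =====

-- A's increasing loop reaches the least divisor of n1 that is ≥ the start.
theorem pvLoopUp_eq (n1 : Int) : ∀ (f : Nat) (n2 t : Int), t ∣ n1 → n2 ≤ t →
    (∀ d, n2 ≤ d → d ∣ n1 → t ≤ d) → (t - n2).toNat < f → pvLoopUp n1 f n2 = t := by
  intro f
  induction f with
  | zero => intro n2 t _ _ _ hf; omega
  | succ f ih =>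
    intro n2 t ht hle hmin hf
    by_cases hdvd : PySem.Int.mod n1 n2 = 0
    · have : n2 ∣ n1 := (PySem.Int.mod_eq_zero_iff_dvd n1 n2).mp hdvd
      have := hmin n2 le_rfl this
      have ht2 : t = n2 := le_antisymm this hle
      simp [pvLoopUp, hdvd, ht2]
    · have hne : ¬ (n2 ∣ n1) := fun h => hdvd ((PySem.Int.mod_eq_zero_iff_dvd n1 n2).mpr h)
      have htn : t ≠ n2 := fun h => hne (h ▸ ht)
      have h1 : n2 + 1 ≤ t := by omega
      have hstep : pvLoopUp n1 (f+1) n2 = pvLoopUp n1 f (n2+1) := by simp [pvLoopUp, hdvd]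
      rw [hstep]
      exact ih (n2+1) t ht h1 (fun d hd hdv => hmin d (by omega) hdv) (by omega)

-- A's decreasing loop reaches the greatest divisor of n1 that is ≤ the start.
theorem pvLoopDown_eq (n1 : Int) : ∀ (f : Nat) (n2 t : Int), t ∣ n1 → t ≤ n2 →
    (∀ d, d ≤ n2 → d ∣ n1 → d ≤ t) → (n2 - t).toNat < f → pvLoopDown n1 f n2 = t := by
  intro f
  induction f with
  | zero => intro n2 t _ _ _ hf; omega
  | succ f ih =>
    intro n2 t ht hle hmax hf
    by_cases hdvd : PySem.Int.mod n1 n2 = 0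
    · have : n2 ∣ n1 := (PySem.Int.mod_eq_zero_iff_dvd n1 n2).mp hdvd
      have := hmax n2 le_rfl this
      have ht2 : t = n2 := le_antisymm hle this
      simp [pvLoopDown, hdvd, ht2]
    · have hne : ¬ (n2 ∣ n1) := fun h => hdvd ((PySem.Int.mod_eq_zero_iff_dvd n1 n2).mpr h)
      have htn : t ≠ n2 := fun h => hne (h ▸ ht)
      have h1 : t ≤ n2 - 1 := by omega
      have hstep : pvLoopDown n1 (f+1) n2 = pvLoopDown n1 f (n2-1) := by simp [pvLoopDown, hdvd]
      rw [hstep]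
      exact ih (n2-1) t ht h1 (fun d hd hdv => hmax d (by omega) hdv) (by omega)

-- membership in B's candidate list, as the trial-division loop runs
theorem mem_pvCollect (a : Int) : ∀ (f : Nat) (d : Int) (acc : List Int) (x : Int),
    1 ≤ d → (a + 1 - d).toNat < f →
    (x ∈ pvCollect a f d acc ↔ x ∈ acc ∨
      ∃ s, d ≤ s ∧ s * s ≤ a ∧ s ∣ a ∧ (x = s ∨ x = -s ∨ x = a / s ∨ x = -(a / s))) := by
  intro f
  induction f with
  | zero => intro d acc x hd hf; omega
  | succ f ih =>
    intro d acc x hd hf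
    by_cases hsq : d * d ≤ a
    · have hda : d ≤ a := le_trans (le_mul_of_one_le_left (by omega) hd) hsq
      have hrec : pvCollect a (f+1) d acc = pvCollect a f (d+1)
          (if PySem.Int.mod a d = 0 then
             acc ++ [d, -d, PySem.Int.floordiv a d, -(PySem.Int.floordiv a d)]
           else acc) := by
        simp [pvCollect, hsq]
      rw [hrec, ih (d+1) _ x (by omega) (by omega)]
      by_cases hdvd : PySem.Int.mod a d = 0
      · have hdv : d ∣ a := (PySem.Int.mod_eq_zero_iff_dvd a d).mp hdvd
        have hfd : PySem.Int.floordiv a d = a / d := PySem.Int.floordiv_eq_ediv_of_pos (by omega)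
        simp only [hdvd, if_pos, hfd, List.mem_append, List.mem_cons, List.not_mem_nil, or_false]
        constructor
        · rintro ((hx | hx) | ⟨s, hs1, hs2, hs3, hs4⟩)
          · exact Or.inl hx
          · exact Or.inr ⟨d, le_rfl, hsq, hdv, hx⟩
          · exact Or.inr ⟨s, by omega, hs2, hs3, hs4⟩
        · rintro (hx | ⟨s, hs1, hs2, hs3, hs4⟩)
          · exact Or.inl (Or.inl hx)
          · by_cases hsd : s = d
            · subst hsd
              exact Or.inl (Or.inr hs4)
            · exact Or.inr ⟨s, by omega, hs2, hs3, hs4⟩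
      · have hndv : ¬ (d ∣ a) := fun h => hdvd ((PySem.Int.mod_eq_zero_iff_dvd a d).mpr h)
        simp only [hdvd, if_neg, not_false_iff]
        constructor
        · rintro (hx | ⟨s, hs1, hs2, hs3, hs4⟩)
          · exact Or.inl hx
          · exact Or.inr ⟨s, by omega, hs2, hs3, hs4⟩
        · rintro (hx | ⟨s, hs1, hs2, hs3, hs4⟩)
          · exact Or.inl hx
          · have hsd : s ≠ d := fun h => hndv (h ▸ hs3)
            exact Or.inr ⟨s, by omega, hs2, hs3, hs4⟩
    · have hstop : pvCollect a (f+1) d acc = acc := by simp [pvCollect, hsq]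
      rw [hstop]
      constructor
      · exact Or.inl
      · rintro (hx | ⟨s, hs1, hs2, hs3, hs4⟩)
        · exact hx
        · exfalso
          have : d * d ≤ s * s := mul_le_mul hs1 hs1 (by omega) (by omega)
          omega

-- the divisor pairing s ↔ a/s: the candidates found below sqrt(a) cover ALL divisors
theorem divisor_pair (a x : Int) (ha : 1 ≤ a) :
    (∃ s, 1 ≤ s ∧ s * s ≤ a ∧ s ∣ a ∧ (x = s ∨ x = -s ∨ x = a / s ∨ x = -(a / s))) ↔
      x ≠ 0 ∧ x ∣ a := by
  constructor
  · rintro ⟨s, hs1, hs2, hs3, hx⟩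
    have hq : s * (a / s) = a := Int.mul_ediv_cancel' hs3
    have hqdvd : (a / s) ∣ a := ⟨s, by rw [mul_comm]; exact hq.symm⟩
    have hq1 : 1 ≤ a / s := by
      by_contra h
      have h' : a / s ≤ 0 := by omega
      have := mul_nonpos_of_nonneg_of_nonpos (by omega : (0:ℤ) ≤ s) h'
      omega
    rcases hx with h | h | h | h <;> subst h
    · exact ⟨by omega, hs3⟩
    · exact ⟨by omega, (neg_dvd).mpr hs3⟩
    · exact ⟨by omega, hqdvd⟩
    · exact ⟨by omega, (neg_dvd).mpr hqdvd⟩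
  · rintro ⟨hx0, hxdvd⟩
    have hm1 : 1 ≤ |x| := Int.one_le_abs hx0
    have hmdvd : |x| ∣ a := (abs_dvd x a).mpr hxdvd
    have hxabs : x = |x| ∨ x = -|x| := by
      rcases abs_cases x with ⟨h, _⟩ | ⟨h, _⟩
      · exact Or.inl h.symm
      · exact Or.inr (by linarith)
    by_cases hsq : |x| * |x| ≤ a
    · exact ⟨|x|, hm1, hsq, hmdvd, by tauto⟩
    · push_neg at hsq
      set m := |x| with hm
      set s := a / m with hs
      have heq : m * s = a := Int.mul_ediv_cancel' hmdvd
      have hs1 : 1 ≤ s := by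
        by_contra h
        have h' : s ≤ 0 := by omega
        have := mul_nonpos_of_nonneg_of_nonpos (by omega : (0:ℤ) ≤ m) h'
        omega
      have hslt : s < m := lt_of_mul_lt_mul_left (by rw [heq]; exact hsq) (by omega : (0:ℤ) ≤ m)
      have hss : s * s ≤ a := by
        have := mul_le_mul_of_nonneg_right (le_of_lt hslt) (by omega : (0:ℤ) ≤ s)
        omega
      have hsdvd : s ∣ a := ⟨m, by rw [mul_comm]; exact heq.symm⟩
      have has : a / s = m := by
        rw [← heq, mul_comm, Int.mul_ediv_cancel_left m (by omega)]
      exact ⟨s, hs1, hss, hsdvd, by rw [has]; tauto⟩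

-- B's candidate list holds exactly the nonzero divisors of a
theorem mem_cands (a : Int) (ha : 1 ≤ a) (x : Int) :
    x ∈ pvCollect a (a.toNat + 1) 1 [] ↔ (x ≠ 0 ∧ x ∣ a) := by
  rw [mem_pvCollect a (a.toNat + 1) 1 [] x le_rfl (by omega)]
  simp only [List.not_mem_nil, false_or]
  exact divisor_pair a x ha

theorem calculo_spec_aux (n1 n2 : Int) (_h2 : n2 ≠ 0) : calculo n1 n2 = calculo_alt n1 n2 := by
  by_cases h0 : PySem.Int.mod n1 n2 = 0
  · simp [calculo, calculo_alt, h0]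
  · have hn2dvd : ¬ (n2 ∣ n1) := fun h => h0 ((PySem.Int.mod_eq_zero_iff_dvd n1 n2).mpr h)
    have hn1 : n1 ≠ 0 := fun h => hn2dvd (h ▸ dvd_zero n2)
    have ha : 1 ≤ |n1| := Int.one_le_abs hn1
    by_cases hgt : n1 > n2
    · -- increasing branch: least divisor t ≥ n2
      have hw : ∃ z : Int, n2 ≤ z ∧ z ∣ n1 := by
        by_cases hp : 0 < n1
        · exact ⟨n1, le_of_lt hgt, dvd_refl n1⟩
        · exact ⟨-1, by omega, ⟨-n1, by ring⟩⟩
      obtain ⟨t, ⟨htle, htdvd⟩, htmin⟩ :=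
        Int.exists_least_of_bdd (P := fun z => n2 ≤ z ∧ z ∣ n1) ⟨n2, fun z hz => hz.1⟩ hw
      have ht0 : t ≠ 0 := fun h => hn1 (by simpa [h] using htdvd)
      have htne : t ≠ n2 := fun h => hn2dvd (h ▸ htdvd)
      have htbound : t ≤ max n1 (-1) := by
        by_cases hp : 0 < n1
        · exact le_trans (htmin n1 ⟨le_of_lt hgt, dvd_refl n1⟩) (le_max_left _ _)
        · exact le_trans (htmin (-1) ⟨by omega, ⟨-n1, by ring⟩⟩) (le_max_right _ _)
      have hA : calculo n1 n2 = t := by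
        have := pvLoopUp_eq n1 ((max n1 (-1) - n2).toNat + 1) n2 t htdvd htle
          (fun d hd hdv => htmin d ⟨hd, hdv⟩) (by omega)
        simp [calculo, h0, hgt, this]
      have hB : calculo_alt n1 n2 = t := by
        have htf : t ∈ (pvCollect |n1| (|n1|.toNat + 1) 1 []).filter (fun x => n2 < x) := by
          rw [List.mem_filter]
          exact ⟨(mem_cands |n1| ha t).mpr ⟨ht0, (dvd_abs t n1).mpr htdvd⟩,
            by simp; omega⟩
        cases hm : PySem.List.min?
            ((pvCollect |n1| (|n1|.toNat + 1) 1 []).filter (fun x => n2 < x)) (fun x => x) with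
        | none =>
          exfalso
          rw [PySem.List.min?_eq_none_iff] at hm
          rw [hm] at htf
          exact List.not_mem_nil htf
        | some m =>
          have hmem := PySem.List.min?_mem hm
          rw [List.mem_filter] at hmem
          have hmdvd : m ∣ n1 := (dvd_abs m n1).mp ((mem_cands |n1| ha m).mp hmem.1).2
          have hmgt : n2 < m := by have := hmem.2; simpa using this
          have h1 : m ≤ t := PySem.List.min?_isMin hm t htf
          have h2' : t ≤ m := htmin m ⟨le_of_lt hmgt, hmdvd⟩
          have : m = t := le_antisymm h1 h2'
          simp [calculo_alt, h0, hgt, hm, this]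
      rw [hA, hB]
    · -- decreasing branch: greatest divisor t ≤ n2
      have hlt : n1 < n2 := by
        rcases lt_or_eq_of_le (not_lt.mp hgt) with h | h
        · exact h
        · exact absurd (h ▸ dvd_refl n1 : n2 ∣ n1) hn2dvd
      have hw : ∃ z : Int, z ≤ n2 ∧ z ∣ n1 := by
        by_cases hp : 0 < n1
        · exact ⟨1, by omega, one_dvd n1⟩
        · exact ⟨n1, le_of_lt hlt, dvd_refl n1⟩
      obtain ⟨t, ⟨htle, htdvd⟩, htmax⟩ :=
        Int.exists_greatest_of_bdd (P := fun z => z ≤ n2 ∧ z ∣ n1) ⟨n2, fun z hz => hz.1⟩ hw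
      have ht0 : t ≠ 0 := fun h => hn1 (by simpa [h] using htdvd)
      have htne : t ≠ n2 := fun h => hn2dvd (h ▸ htdvd)
      have htbound : min n1 1 ≤ t := by
        by_cases hp : 0 < n1
        · exact le_trans (min_le_right _ _) (htmax 1 ⟨by omega, one_dvd n1⟩)
        · exact le_trans (min_le_left _ _) (htmax n1 ⟨le_of_lt hlt, dvd_refl n1⟩)
      have hA : calculo n1 n2 = t := by
        have := pvLoopDown_eq n1 ((n2 - min n1 1).toNat + 1) n2 t htdvd htle
          (fun d hd hdv => htmax d ⟨hd, hdv⟩) (by omega)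
        simp [calculo, h0, hgt, this]
      have hB : calculo_alt n1 n2 = t := by
        have htf : t ∈ (pvCollect |n1| (|n1|.toNat + 1) 1 []).filter (fun x => x < n2) := by
          rw [List.mem_filter]
          exact ⟨(mem_cands |n1| ha t).mpr ⟨ht0, (dvd_abs t n1).mpr htdvd⟩,
            by simp; omega⟩
        cases hm : PySem.List.max?
            ((pvCollect |n1| (|n1|.toNat + 1) 1 []).filter (fun x => x < n2)) (fun x => x) with
        | none =>
          exfalso
          rw [PySem.List.max?_eq_none_iff] at hm
          rw [hm] at htf
          exact List.not_mem_nil htf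
        | some m =>
          have hmem := PySem.List.max?_mem hm
          rw [List.mem_filter] at hmem
          have hmdvd : m ∣ n1 := (dvd_abs m n1).mp ((mem_cands |n1| ha m).mp hmem.1).2
          have hmlt : m < n2 := by have := hmem.2; simpa using this
          have h1 : t ≤ m := PySem.List.max?_isMax hm t htf
          have h2' : m ≤ t := htmax m ⟨le_of_lt hmlt, hmdvd⟩
          have : m = t := le_antisymm h2' h1
          simp [calculo_alt, h0, hgt, hm, this]
      rw [hA, hB]

-- ===== VERDICT (by name: the statement is the Claim_ definition above) =====
theorem calculo_spec : Claim_equal_calculo := by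
  intro n1 n2 _ hpre
  exact calculo_spec_aux n1 n2 hpre
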